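-- pv_equiv track=rewrite | github.com/nurnisi/algorithms-and-data-structures | pramp/01-Busiest Time in The Mall.py | find_busiest_period
-- ===== SOURCE A (Python) =====
-- def find_busiest_period(data):
--   peak_time = peak_vis = cur_vis = i = 0
--
--   while i < len(data):
--     time, v, enter = data[i]
--     cur_vis += v if enter else -v
--
--     if i == len(data)-1 or time != data[i+1][0]:
--       if cur_vis > peak_vis:
--         peak_vis = cur_vis
--         peak_time = time
--
--     i += 1
--
--   return peak_time
-- ===== SOURCE B (Python) =====
-- def find_busiest_period(data):
--     if not data:
--         return 0
--     # stage 1: prefix sums of signed visitor counts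
--     sums = []
--     s = 0
--     for t, v, enter in data:
--         s += v if enter else -v
--         sums.append(s)
--     # stage 2: (total, timestamp) at the end of each consecutive-timestamp group
--     n = len(data)
--     bounds = [(sums[i], data[i][0]) for i in range(n)
--               if i == n - 1 or data[i][0] != data[i + 1][0]]
--     # stage 3: global maximum total, then first timestamp attaining it
--     top = max(s for s, _ in bounds)
--     if top <= 0:
--         return 0
--     for s, t in bounds:
--         if s == top:
--             return t
-- ===== Notes on version B (the rewrite author's own statement) =====
-- stated objective: alternative
-- what changed: B is staged instead of A's single sweep with a running strict-max update: it first materializes the full prefix-sum list, then extracts the (total, timestamp) pair at each consecutive-timestamp group boundary, then computes the global maximum total, and finally returns the first timestamp attaining it (0 if the maximum is not positive or the data is empty).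
import Mathlib
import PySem

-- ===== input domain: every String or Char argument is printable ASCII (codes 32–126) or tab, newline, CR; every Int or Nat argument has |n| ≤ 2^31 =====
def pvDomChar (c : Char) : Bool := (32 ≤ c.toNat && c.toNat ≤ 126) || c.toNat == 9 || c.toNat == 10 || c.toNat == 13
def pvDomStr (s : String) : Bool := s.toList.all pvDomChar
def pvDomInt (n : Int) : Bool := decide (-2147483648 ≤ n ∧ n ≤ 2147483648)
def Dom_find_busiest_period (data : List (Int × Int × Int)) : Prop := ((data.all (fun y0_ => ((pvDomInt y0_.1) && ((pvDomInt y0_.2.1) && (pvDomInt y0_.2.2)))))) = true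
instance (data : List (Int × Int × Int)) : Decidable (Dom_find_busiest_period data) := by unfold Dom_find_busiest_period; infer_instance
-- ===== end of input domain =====

-- B replaces A's single sweep with a running strict-max update by a staged computation
-- (prefix-sum list, group-boundary pairs, global max, first timestamp attaining it): same cost, different algorithm.

-- ===== PORT A =====
-- A's while loop: index i over data, lookahead at data[i+1] to detect a group boundary.
def fbpA_go (data : List (Int × Int × Int)) (peak_time peak_vis cur_vis : Int) (i : Nat) : Int :=
  if h : i < data.length then
    let te := data[i]
    let cur' := cur_vis + (if te.2.2 ≠ 0 then te.2.1 else -te.2.1)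
    if i = data.length - 1 ∨ te.1 ≠ (data.getD (i+1) (0,0,0)).1 then
      if cur' > peak_vis then fbpA_go data te.1 cur' cur' (i+1)
      else fbpA_go data peak_time peak_vis cur' (i+1)
    else fbpA_go data peak_time peak_vis cur' (i+1)
  else peak_time
termination_by data.length - i
decreasing_by all_goals exact Nat.sub_succ_lt_self _ _ h

def find_busiest_period (data : List (Int × Int × Int)) : Int :=
  fbpA_go data 0 0 0 0

-- ===== PORT B =====
-- stage 1 loop: sums.append(s) for each entry (accumulator = (s, sums))
def fbpB_sums (data : List (Int × Int × Int)) : Int × List Int :=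
  data.foldl (fun acc x =>
    let s := acc.1 + (if x.2.2 ≠ 0 then x.2.1 else -x.2.1)
    (s, acc.2 ++ [s])) (0, [])

-- stage 3 final loop: first pair whose total equals top (Python's fall-off-the-end cannot happen)
def fbpB_first : List (Int × Int) → Int → Int
  | [], _ => 0
  | (s, t) :: rest, top => if s = top then t else fbpB_first rest top

def find_busiest_period_alt (data : List (Int × Int × Int)) : Int :=
  if data = [] then 0
  else
    let sums := (fbpB_sums data).2
    let n := data.length
    let bounds := (List.range n).filterMap (fun i =>
      if i = n - 1 ∨ (data.getD i (0,0,0)).1 ≠ (data.getD (i+1) (0,0,0)).1 then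
        some (sums.getD i 0, (data.getD i (0,0,0)).1)
      else none)
    match PySem.List.max? (bounds.map Prod.fst) (fun y => y) with
    | none => 0
    | some top => if top ≤ 0 then 0 else fbpB_first bounds top

-- ===== PRECONDITION & SPEC =====
def Spec_find_busiest_period (data : List (Int × Int × Int)) (out : Int) : Prop := out = find_busiest_period_alt data
instance (data : List (Int × Int × Int)) (out : Int) : Decidable (Spec_find_busiest_period data out) := by unfold Spec_find_busiest_period; infer_instance

-- ===== CLAIM (what is proved, stated in full; the proofs are below) =====
def Claim_equal_find_busiest_period : Prop := ∀ (data : List (Int × Int × Int)), Dom_find_busiest_period data → Spec_find_busiest_period data (find_busiest_period data)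

-- ===== LEMMAS AND PROOFS =====

-- net visitor delta of one entry: `v if enter else -v`
def pvis (x : Int × Int × Int) : Int := if x.2.2 = 0 then -x.2.1 else x.2.1

theorem pvis_eq (x : Int × Int × Int) : (if x.2.2 ≠ 0 then x.2.1 else -x.2.1) = pvis x := by
  unfold pvis; by_cases h : x.2.2 = 0 <;> simp [h]

-- list-level version of A's flat loop
def aList : List (Int × Int × Int) → Int → Int → Int → Int
  | [], pt, _, _ => pt
  | x :: rest, pt, pv, cur =>
    if rest = [] ∨ x.1 ≠ (rest.headD (0,0,0)).1 then
      if cur + pvis x > pv then aList rest x.1 (cur + pvis x) (cur + pvis x)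
      else aList rest pt pv (cur + pvis x)
    else aList rest pt pv (cur + pvis x)

-- the (total, timestamp) pair at the end of each consecutive-timestamp group (reference shape)
def boundsL : List (Int × Int × Int) → Int → List (Int × Int)
  | [], _ => []
  | x :: rest, cur =>
    if rest = [] ∨ x.1 ≠ (rest.headD (0,0,0)).1 then
      (cur + pvis x, x.1) :: boundsL rest (cur + pvis x)
    else boundsL rest (cur + pvis x)

-- A's running strict-max update, abstracted to the bounds list
def runPeak : List (Int × Int) → Int → Int → Int
  | [], pt, _ => pt
  | (s, t) :: rest, pt, pv => if s > pv then runPeak rest t s else runPeak rest pt pv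

-- prefix-sum list (reference shape of stage 1)
def sumsL : List (Int × Int × Int) → Int → List Int
  | [], _ => []
  | x :: rest, c => (c + pvis x) :: sumsL rest (c + pvis x)

def netEnd : List (Int × Int × Int) → Int → Int
  | [], c => c
  | x :: rest, c => netEnd rest (c + pvis x)

-- bridge: A's flat loop is aList on the suffix
theorem fbpA_go_eq (data : List (Int × Int × Int)) :
    ∀ (n : Nat) (pt pv cur : Int) (i : Nat), data.length - i ≤ n →
    fbpA_go data pt pv cur i = aList (data.drop i) pt pv cur := by
  intro n
  induction n with
  | zero =>
    intro pt pv cur i hn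
    rw [fbpA_go, dif_neg (by omega : ¬ i < data.length), List.drop_eq_nil_of_le (by omega)]
    rw [aList]
  | succ m ih =>
    intro pt pv cur i hn
    by_cases hi : i < data.length
    · have hdrop : data.drop i = data[i] :: data.drop (i+1) := List.drop_eq_getElem_cons hi
      have hcond : (i = data.length - 1 ∨ (data[i] : Int × Int × Int).1 ≠ (data.getD (i+1) (0,0,0)).1)
          = (data.drop (i+1) = [] ∨ (data[i] : Int × Int × Int).1 ≠ ((data.drop (i+1)).headD (0,0,0)).1) := by
        apply propext
        by_cases hlast : i + 1 < data.length
        · have h1 : data.drop (i+1) = data[i+1] :: data.drop (i+2) := List.drop_eq_getElem_cons hlast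
          have h2 : data.getD (i+1) (0,0,0) = data[i+1] := List.getD_eq_getElem data (0,0,0) hlast
          rw [h1, h2, List.headD_cons]
          have hne : ¬ i = data.length - 1 := by omega
          constructor
          · rintro (h | h)
            · exact absurd h hne
            · exact Or.inr h
          · rintro (h | h)
            · exact absurd h (List.cons_ne_nil _ _)
            · exact Or.inr h
        · have h1 : data.drop (i+1) = [] := List.drop_eq_nil_of_le (by omega)
          have heq : i = data.length - 1 := by omega
          rw [h1]
          simp [heq]
      rw [fbpA_go, dif_pos hi]
      simp only [pvis_eq, hcond]
      rw [hdrop, aList]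
      split
      · split
        · exact ih _ _ _ (i+1) (by omega)
        · exact ih _ _ _ (i+1) (by omega)
      · exact ih _ _ _ (i+1) (by omega)
    · rw [fbpA_go, dif_neg hi, List.drop_eq_nil_of_le (by omega)]
      rw [aList]

-- aList updates its peak exactly at the boundaries recorded by boundsL
theorem aList_eq_runPeak : ∀ (l : List (Int × Int × Int)) (pt pv cur : Int),
    aList l pt pv cur = runPeak (boundsL l cur) pt pv := by
  intro l
  induction l with
  | nil => intro pt pv cur; rfl
  | cons x rest ih =>
    intro pt pv cur
    by_cases hb : rest = [] ∨ x.1 ≠ (rest.headD (0,0,0)).1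
    · rw [aList, if_pos hb, boundsL, if_pos hb, runPeak]
      split
      · exact ih _ _ _
      · exact ih _ _ _
    · rw [aList, if_neg hb, boundsL, if_neg hb]
      exact ih _ _ _

-- stage 1 loop builds the prefix-sum list
theorem fbpB_sums_eq : ∀ (l : List (Int × Int × Int)) (c : Int) (acc : List Int),
    l.foldl (fun acc x =>
      let s := acc.1 + (if x.2.2 ≠ 0 then x.2.1 else -x.2.1)
      (s, acc.2 ++ [s])) (c, acc) = (netEnd l c, acc ++ sumsL l c) := by
  intro l
  induction l with
  | nil => intro c acc; simp [netEnd, sumsL]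
  | cons x rest ih =>
    intro c acc
    rw [List.foldl_cons]
    have hstep : (let s := (c, acc).1 + (if x.2.2 ≠ 0 then x.2.1 else -x.2.1)
        ((s, (c, acc).2 ++ [s]) : Int × List Int)) = (c + pvis x, acc ++ [c + pvis x]) := by
      simp [pvis]
    rw [hstep, ih (c + pvis x) (acc ++ [c + pvis x])]
    simp [netEnd, sumsL]

-- the index comprehension of stage 2 equals boundsL
theorem bounds_eq : ∀ (data : List (Int × Int × Int)) (cur : Int),
    (List.range data.length).filterMap (fun i =>
      if i = data.length - 1 ∨ (data.getD i (0,0,0)).1 ≠ (data.getD (i+1) (0,0,0)).1 then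
        some ((sumsL data cur).getD i 0, (data.getD i (0,0,0)).1)
      else none) = boundsL data cur := by
  intro data
  induction data with
  | nil => intro cur; rfl
  | cons x rest ih =>
    intro cur
    simp only [List.length_cons, Nat.add_sub_cancel]
    rw [List.range_succ_eq_map, List.filterMap_cons, List.filterMap_map]
    have htail : (List.range rest.length).filterMap
        ((fun i =>
          if i = rest.length ∨ ((x :: rest).getD i (0,0,0)).1 ≠ ((x :: rest).getD (i+1) (0,0,0)).1 then
            some ((sumsL (x :: rest) cur).getD i 0, ((x :: rest).getD i (0,0,0)).1)
          else none) ∘ Nat.succ)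
        = boundsL rest (cur + pvis x) := by
      rw [← ih (cur + pvis x)]
      apply List.filterMap_congr
      intro i hi
      have hlt : i < rest.length := List.mem_range.mp hi
      have hidx : (i + 1 = rest.length) = (i = rest.length - 1) := by
        apply propext; omega
      simp only [Function.comp, Nat.succ_eq_add_one, List.getD_cons_succ, sumsL, hidx]
    rw [htail]
    by_cases h0 : 0 = rest.length ∨ ((x :: rest).getD 0 (0,0,0)).1 ≠ ((x :: rest).getD 1 (0,0,0)).1
    · have hb : rest = [] ∨ x.1 ≠ (rest.headD (0,0,0)).1 := by
        rcases h0 with h | h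
        · left; exact List.eq_nil_of_length_eq_zero (by omega)
        · right; simpa [List.getD, List.headD_eq_head?, List.head?_eq_getElem?] using h
      rw [if_pos h0, boundsL, if_pos hb]
      simp [sumsL, List.getD]
    · have hb : ¬ (rest = [] ∨ x.1 ≠ (rest.headD (0,0,0)).1) := by
        intro hc
        apply h0
        rcases hc with h | h
        · left; simp [h]
        · right; simpa [List.getD, List.headD_eq_head?, List.head?_eq_getElem?] using h
      rw [if_neg h0, boundsL, if_neg hb]

-- a running max never drops below its seed
theorem foldl_max_ge_seed : ∀ (bs : List (Int × Int)) (m : Int),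
    m ≤ bs.foldl (fun a q => max a q.1) m := by
  intro bs
  induction bs with
  | nil => intro m; exact le_refl m
  | cons p rest ih =>
    intro m
    calc m ≤ max m p.1 := le_max_left _ _
      _ ≤ rest.foldl (fun a q => max a q.1) (max m p.1) := ih _

-- the running strict-max update returns the first timestamp attaining the seeded maximum
theorem runPeak_char : ∀ (bs : List (Int × Int)) (pt pv : Int),
    runPeak bs pt pv =
      if bs.foldl (fun a q => max a q.1) pv > pv then
        fbpB_first bs (bs.foldl (fun a q => max a q.1) pv)
      else pt := by
  intro bs
  induction bs with
  | nil => intro pt pv; simp [runPeak]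
  | cons p rest ih =>
    intro pt pv
    simp only [runPeak, List.foldl_cons]
    by_cases hp : p.1 > pv
    · rw [if_pos hp]
      have hmax : max pv p.1 = p.1 := max_eq_right (le_of_lt hp)
      rw [hmax]
      set M := rest.foldl (fun a q => max a q.1) p.1 with hM
      have hMge : p.1 ≤ M := foldl_max_ge_seed rest p.1
      rw [ih p.2 p.1]
      have hMpv : M > pv := lt_of_lt_of_le hp hMge
      rw [if_pos hMpv]
      by_cases hMp : M > p.1
      · rw [if_pos hMp]
        obtain ⟨s, t⟩ := p
        have hMp' : M > s := hMp
        simp only [fbpB_first]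
        rw [if_neg (by omega : ¬ s = M)]
      · have hMeq : M = p.1 := le_antisymm (by omega) hMge
        rw [if_neg hMp]
        obtain ⟨s, t⟩ := p
        have hMeq' : M = s := hMeq
        simp only [fbpB_first]
        rw [if_pos (by omega : s = M)]
    · rw [if_neg hp]
      have hmax : max pv p.1 = pv := max_eq_left (by omega)
      rw [hmax, ih pt pv]
      by_cases hM : rest.foldl (fun a q => max a q.1) pv > pv
      · rw [if_pos hM, if_pos hM]
        obtain ⟨s, t⟩ := p
        have hp' : ¬ s > pv := hp
        simp only [fbpB_first]
        rw [if_neg (by omega : ¬ s = rest.foldl (fun a q => max a q.1) pv)]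
      · rw [if_neg hM, if_neg hM]

-- boundsL of a nonempty list is nonempty (the last entry is always a boundary)
theorem boundsL_ne_nil : ∀ (l : List (Int × Int × Int)) (c : Int), l ≠ [] → boundsL l c ≠ [] := by
  intro l
  induction l with
  | nil => intro c h; exact absurd rfl h
  | cons x rest ih =>
    intro c _
    by_cases hb : rest = [] ∨ x.1 ≠ (rest.headD (0,0,0)).1
    · rw [boundsL, if_pos hb]; exact List.cons_ne_nil _ _
    · rw [boundsL, if_neg hb]
      exact ih _ (fun hr => hb (Or.inl hr))

-- ===== VERDICT (by name: the statement is the Claim_ definition above) =====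
theorem find_busiest_period_spec : Claim_equal_find_busiest_period := by
  intro data _
  unfold Spec_find_busiest_period find_busiest_period find_busiest_period_alt
  rw [fbpA_go_eq data data.length 0 0 0 0 (by omega)]
  simp only [List.drop_zero]
  rw [aList_eq_runPeak]
  by_cases hd : data = []
  · subst hd; rfl
  · rw [if_neg hd]
    have hsums : (fbpB_sums data).2 = sumsL data 0 := by
      unfold fbpB_sums
      rw [fbpB_sums_eq data 0 []]
      simp
    simp only [hsums, bounds_eq data 0]
    rcases hbs : boundsL data 0 with _ | ⟨p, rest⟩
    · exact absurd hbs (boundsL_ne_nil data 0 hd)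
    · rw [List.map_cons, PySem.List.max?_id_cons]
      simp only []
      rw [runPeak_char]
      have hfold : (p :: rest).foldl (fun a q => max a q.1) 0
          = max 0 ((rest.map Prod.fst).foldl max p.1) := by
        simp only [List.foldl_cons]
        rw [List.foldl_map]
        have h1 : ∀ (t : List (Int × Int)) (a b : Int),
            t.foldl (fun x q => max x q.1) (max a b) = max a (t.foldl (fun x q => max x q.1) b) := by
          intro t
          induction t with
          | nil => intro a b; rfl
          | cons y ys ihy =>
            intro a b
            simp only [List.foldl_cons]
            rw [max_assoc, ihy]
        exact h1 rest 0 p.1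
      set T := (rest.map Prod.fst).foldl max p.1 with hT
      rw [hfold]
      by_cases hTpos : T > 0
      · rw [if_pos (by omega : max 0 T > 0), if_neg (by omega : ¬ T ≤ 0)]
        congr 1
        omega
      · rw [if_neg (by omega : ¬ max 0 T > 0), if_pos (by omega : T ≤ 0)]
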